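-- pv_equiv track=rewrite | github.com/ArtemUdovenko/USE-2 | classes.py | Generator1
-- ===== SOURCE A (Python) =====
-- class Class1:
--     @staticmethod
--     def Aux_generator(x):
--         for i in range(2 ** x):
--             yield '0' * (x - len(bin(i)[2:])) + bin(i)[2:]
--     @staticmethod
--     def check(matrix):
--         for i in range(len(matrix)):
--             for j in range(i + 1, len(matrix)):
--                 if matrix[i] == matrix[j]: return False
--         return True
--
-- def Generator1(matrix):
--     counter = 0
--     for i in range(len(matrix)):
--         for j in range(len(matrix[i])):
--             if matrix[i][j] == '.': counter += 1
--     for substitution in Class1.Aux_generator(counter):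
--         aux_matrix = [[j for j in i] for i in matrix]
--         pointer = 0
--         for i in range(len(aux_matrix)):
--             for j in range(len(aux_matrix[i])):
--                 if aux_matrix[i][j] == '.':
--                     aux_matrix[i][j] = substitution[pointer]
--                     pointer += 1
--         if Class1.check(aux_matrix):
--             yield aux_matrix
--         else:
--             continue
-- ===== SOURCE B (Python) =====
-- # B: recursive product over rows/cells (first '.' = outermost branch, '0' before '1'),
-- # with distinctness checked by one set of row-tuples instead of A's pairwise scan.
-- def Generator1(matrix):
--     def row_options(row):
--         opts = [[]]
--         for cell in row:
--             if cell == '.':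
--                 opts = [r + [c] for r in opts for c in '01']
--             else:
--                 opts = [r + [cell] for r in opts]
--         return opts
--
--     def build(rows):
--         if not rows:
--             yield []
--             return
--         for head in row_options(rows[0]):
--             for rest in build(rows[1:]):
--                 yield [head] + rest
--
--     for cand in build(matrix):
--         if len(set(map(tuple, cand))) == len(cand):
--             yield cand
-- ===== Notes on version B (the rewrite author's own statement) =====
-- stated objective: alternative
-- what changed: A counts the dots, enumerates integers 0..2^counter-1, pads bin(i) to a substitution string and fills a fresh copy with a running pointer, then does an O(rows^2) pairwise distinctness scan; B never builds bit strings: it recursively takes the product of per-row fill-ins (branching 0/1 at each '.'), and tests distinctness with a single set of row-tuples.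
import Mathlib
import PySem

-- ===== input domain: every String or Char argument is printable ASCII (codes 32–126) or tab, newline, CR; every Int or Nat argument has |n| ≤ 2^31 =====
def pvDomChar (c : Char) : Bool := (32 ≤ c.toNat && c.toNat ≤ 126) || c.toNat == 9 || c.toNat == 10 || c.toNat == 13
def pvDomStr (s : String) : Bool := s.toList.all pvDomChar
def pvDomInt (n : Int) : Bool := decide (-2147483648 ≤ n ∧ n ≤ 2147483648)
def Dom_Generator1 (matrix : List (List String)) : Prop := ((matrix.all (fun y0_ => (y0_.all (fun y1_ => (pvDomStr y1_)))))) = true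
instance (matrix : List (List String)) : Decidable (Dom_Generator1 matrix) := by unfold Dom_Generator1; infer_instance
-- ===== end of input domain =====

-- A enumerates integers and fills padded bit strings through a pointer, checking distinctness pairwise;
-- B builds the same matrices by a recursive product over rows (branching 0/1 at each '.') and checks
-- distinctness with one set of row-tuples. Proved: identical output lists on every input (alternative, not faster).


-- ===== PORT A =====
-- Class1.check: pairwise row comparison, False at a first equal pair (same value as this all-scan)
def pyCheck (m : List (List String)) : Bool :=
  (List.range m.length).all (fun i =>
    (List.range' (i + 1) (m.length - (i + 1))).all (fun j => !(m.getD i [] == m.getD j [])))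

-- the fill loop of Generator1: copy of the matrix with each '.' replaced by substitution[pointer]
def pyFill (sub : List Char) (matrix : List (List String)) : List (List String) × Nat :=
  matrix.foldl (fun st row =>
    let st2 := row.foldl (fun (st2 : List String × Nat) cell =>
      if cell == "." then (st2.1 ++ [String.ofList [sub.getD st2.2 ' ']], st2.2 + 1)
      else (st2.1 ++ [cell], st2.2)) (([] : List String), st.2)
    (st.1 ++ [st2.1], st2.2)) (([] : List (List String)), 0)

def Generator1 (matrix : List (List String)) : List (List (List String)) :=
  let counter := matrix.foldl (fun c row =>
    row.foldl (fun c cell => if cell == "." then c + 1 else c) c) 0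
  (List.range (2 ^ counter)).foldl (fun acc i =>
    -- substitution = '0' * (counter - len(bin(i)[2:])) + bin(i)[2:]  (bin(i)[2:] = PySem.Int.toBinChars for i ≥ 0)
    let sub := List.replicate (counter - (PySem.Int.toBinChars (Int.ofNat i)).length) '0'
                 ++ PySem.Int.toBinChars (Int.ofNat i)
    let aux := (pyFill sub matrix).1
    if pyCheck aux then acc ++ [aux] else acc) []

-- ===== PORT B =====
def fillRowB (row : List String) : List (List String) :=
  row.foldl (fun opts cell =>
    if cell == "." then opts.flatMap (fun r => [r ++ ["0"], r ++ ["1"]])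
    else opts.map (fun r => r ++ [cell])) [[]]

def buildB : List (List String) → List (List (List String))
  | [] => [[]]
  | row :: rest => (fillRowB row).flatMap (fun h => (buildB rest).map (fun m => h :: m))

def Generator1_alt (matrix : List (List String)) : List (List (List String)) :=
  (buildB matrix).filter (fun cand => (PySem.Set.ofList cand).length == cand.length)

-- ===== PRECONDITION & SPEC =====
def Spec_Generator1 (matrix : List (List String)) (out : List (List (List String))) : Prop := out = Generator1_alt matrix
instance (matrix : List (List String)) (out : List (List (List String))) : Decidable (Spec_Generator1 matrix out) := by unfold Spec_Generator1; infer_instance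

-- ===== CLAIM (what is proved, stated in full; the proofs are below) =====
def Claim_equal_Generator1 : Prop := ∀ (matrix : List (List String)), Dom_Generator1 matrix → Spec_Generator1 matrix (Generator1 matrix)

-- ===== LEMMAS AND PROOFS =====

-- bin(i)[2:] as a structural recursion on the number
def binRec : Nat → List Char
  | 0 => ['0']
  | 1 => ['1']
  | n + 2 => binRec ((n + 2) / 2) ++ [Nat.digitChar ((n + 2) % 2)]
decreasing_by exact Nat.div_lt_self (by omega) (by omega)

theorem toDigitsCore_eq_binRec : ∀ (f n : Nat) (ds : List Char), n < f →
    Nat.toDigitsCore 2 f n ds = binRec n ++ ds := by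
  intro f
  induction f with
  | zero => intro n ds h; omega
  | succ f ih =>
    intro n ds h
    show (if n / 2 = 0 then Nat.digitChar (n % 2) :: ds
          else Nat.toDigitsCore 2 f (n / 2) (Nat.digitChar (n % 2) :: ds)) = binRec n ++ ds
    by_cases hn : n / 2 = 0
    · have hn2 : n < 2 := by omega
      interval_cases n <;> simp [hn, binRec, Nat.digitChar]
    · have h2 : 2 ≤ n := by omega
      have hlt : n / 2 < f := by omega
      rw [if_neg hn, ih (n / 2) _ hlt]
      obtain ⟨m, rfl⟩ : ∃ m, n = m + 2 := ⟨n - 2, by omega⟩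
      rw [binRec]
      simp

theorem toBinChars_eq_binRec (n : Nat) : PySem.Int.toBinChars (Int.ofNat n) = binRec n := by
  have h1 : ¬ ((Int.ofNat n) < 0) := by simp
  have h2 : (Int.ofNat n).toNat = n := rfl
  simp only [PySem.Int.toBinChars, if_neg h1, h2, Nat.toDigits]
  rw [toDigitsCore_eq_binRec (n + 1) n [] (by omega)]
  simp

-- width-c binary representation of n (n < 2^c)
def padBin : Nat → Nat → List Char
  | 0, _ => []
  | c + 1, n => padBin c (n / 2) ++ [Nat.digitChar (n % 2)]

theorem padBin_zero (c : Nat) : padBin c 0 = List.replicate c '0' := by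
  induction c with
  | zero => rfl
  | succ c ih => rw [padBin]; simp [ih, List.replicate_succ']; rfl

theorem subst_eq_padBin : ∀ (c n : Nat), 1 ≤ c → n < 2 ^ c →
    List.replicate (c - (binRec n).length) '0' ++ binRec n = padBin c n := by
  intro c
  induction c with
  | zero => omega
  | succ c ih =>
    intro n _ hlt
    rcases Nat.eq_zero_or_pos c with hc | hc
    · subst hc
      have : n < 2 := by simpa using hlt
      interval_cases n <;> simp [binRec, padBin, Nat.digitChar]
    · by_cases h2 : n < 2
      · have hd : n / 2 = 0 := by omega
        have : binRec n = [Nat.digitChar n] := by interval_cases n <;> simp [binRec, Nat.digitChar]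
        rw [padBin, hd, padBin_zero, this]
        have : n % 2 = n := by omega
        rw [this]
        simp
      · obtain ⟨m, rfl⟩ : ∃ m, n = m + 2 := ⟨n - 2, by omega⟩
        rw [binRec]
        have hrec : binRec ((m + 2) / 2) ≠ [] := by
          have : 2 ≤ (m+2) := by omega
          rcases h : (m + 2) / 2 with _ | _ | k <;> simp [binRec]
        have hlen : (binRec ((m + 2) / 2) ++ [Nat.digitChar ((m + 2) % 2)]).length
            = (binRec ((m + 2) / 2)).length + 1 := by simp
        rw [hlen, padBin]
        have hdiv : (m + 2) / 2 < 2 ^ c := by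
          have : 2 ^ (c + 1) = 2 * 2 ^ c := by ring
          omega
        rw [← ih ((m + 2) / 2) hc hdiv]
        have : c + 1 - ((binRec ((m + 2) / 2)).length + 1) = c - (binRec ((m + 2) / 2)).length := by omega
        rw [this, List.append_assoc]

-- all bit strings of length c, in numeric order
def enumBits : Nat → List (List Char)
  | 0 => [[]]
  | c + 1 => (enumBits c).flatMap (fun s => [s ++ ['0'], s ++ ['1']])

theorem range_two_mul_map {α : Type} (n : Nat) (f : Nat → α) :
    (List.range (2 * n)).map f = (List.range n).flatMap (fun q => [f (2 * q), f (2 * q + 1)]) := by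
  induction n with
  | zero => simp
  | succ n ih =>
    have h2 : 2 * (n + 1) = (2 * n + 1) + 1 := by ring
    rw [h2, List.range_succ, List.range_succ, List.range_succ]
    simp [ih]

theorem map_padBin_range (c : Nat) : (List.range (2 ^ c)).map (padBin c) = enumBits c := by
  induction c with
  | zero => simp [enumBits, padBin]
  | succ c ih =>
    have h2 : 2 ^ (c + 1) = 2 * 2 ^ c := by ring
    rw [h2, range_two_mul_map, enumBits, ← ih]
    rw [List.flatMap_map]
    apply List.flatMap_congr
    intro q hq
    have hq0 : (2 * q) / 2 = q := by omega
    have hq1 : (2 * q) % 2 = 0 := by omega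
    have hq2 : (2 * q + 1) / 2 = q := by omega
    have hq3 : (2 * q + 1) % 2 = 1 := by omega
    simp [padBin, hq0, hq1, hq2, hq3, Nat.digitChar]

theorem enumBits_length : ∀ (c : Nat) (s : List Char), s ∈ enumBits c → s.length = c := by
  intro c
  induction c with
  | zero => intro s hs; simp [enumBits] at hs; simp [hs]
  | succ c ih =>
    intro s hs
    simp only [enumBits, List.mem_flatMap] at hs
    obtain ⟨t, ht, hs⟩ := hs
    simp only [List.mem_cons] at hs
    rcases hs with rfl | rfl | h
    · simp [ih t ht]
    · simp [ih t ht]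
    · simp at h

theorem enumBits_succ_front (c : Nat) :
    enumBits (c + 1) = (enumBits c).map ('0' :: ·) ++ (enumBits c).map ('1' :: ·) := by
  induction c with
  | zero => rfl
  | succ c ih =>
    show (enumBits (c + 1)).flatMap (fun s => [s ++ ['0'], s ++ ['1']]) =
      ((enumBits c).flatMap (fun s => [s ++ ['0'], s ++ ['1']])).map ('0' :: ·) ++
      ((enumBits c).flatMap (fun s => [s ++ ['0'], s ++ ['1']])).map ('1' :: ·)
    rw [ih]
    simp only [List.flatMap_append, List.flatMap_map, List.map_flatMap]
    rfl

theorem enumBits_add (a b : Nat) :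
    enumBits (a + b) = (enumBits a).flatMap (fun p => (enumBits b).map (p ++ ·)) := by
  induction b with
  | zero => simp [enumBits]
  | succ b ih =>
    have h : a + (b + 1) = (a + b) + 1 := by ring
    rw [h, show enumBits ((a+b) + 1) = (enumBits (a+b)).flatMap (fun s => [s ++ ['0'], s ++ ['1']]) from rfl, ih]
    rw [List.flatMap_assoc]
    apply List.flatMap_congr
    intro p _
    rw [show enumBits (b + 1) = (enumBits b).flatMap (fun s => [s ++ ['0'], s ++ ['1']]) from rfl]
    rw [List.flatMap_map, List.map_flatMap]
    apply List.flatMap_congr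
    intro q _
    simp [List.append_assoc]

-- dot counts
def dRow : List String → Nat
  | [] => 0
  | cell :: cs => (if cell == "." then 1 else 0) + dRow cs

def dots : List (List String) → Nat
  | [] => 0
  | r :: rs => dRow r + dots rs

theorem counter_eq (matrix : List (List String)) :
    matrix.foldl (fun c row => row.foldl (fun c cell => if cell == "." then c + 1 else c) c) 0
      = dots matrix := by
  have hrow : ∀ (row : List String) (c0 : Nat),
      row.foldl (fun c cell => if cell == "." then c + 1 else c) c0 = c0 + dRow row := by
    intro row
    induction row with
    | nil => intro c0; simp [dRow]
    | cons x xs ih =>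
      intro c0
      rw [List.foldl_cons, ih]
      by_cases h : x == "." <;> simp [dRow, h] <;> omega
  suffices h : ∀ (m : List (List String)) (c0 : Nat),
      m.foldl (fun c row => row.foldl (fun c cell => if cell == "." then c + 1 else c) c) c0 = c0 + dots m by
    simpa using h matrix 0
  intro m
  induction m with
  | nil => intro c0; simp [dots]
  | cons r rs ih =>
    intro c0
    rw [List.foldl_cons, hrow, ih, dots]
    omega

-- recursive form of the fill
def rowFill (s : List Char) : Nat → List String → List String
  | _, [] => []
  | p, cell :: cs =>
    if cell == "." then String.ofList [s.getD p ' '] :: rowFill s (p + 1) cs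
    else cell :: rowFill s p cs

def matFill (s : List Char) : Nat → List (List String) → List (List String)
  | _, [] => []
  | p, r :: rs => rowFill s p r :: matFill s (p + dRow r) rs

theorem pyFill_eq (s : List Char) (matrix : List (List String)) :
    (pyFill s matrix).1 = matFill s 0 matrix := by
  have hrow : ∀ (row : List String) (acc : List String) (p : Nat),
      row.foldl (fun (st2 : List String × Nat) cell =>
        if cell == "." then (st2.1 ++ [String.ofList [s.getD st2.2 ' ']], st2.2 + 1)
        else (st2.1 ++ [cell], st2.2)) (acc, p) = (acc ++ rowFill s p row, p + dRow row) := by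
    intro row
    induction row with
    | nil => intro acc p; simp [rowFill, dRow]
    | cons x xs ih =>
      intro acc p
      rw [List.foldl_cons]
      by_cases h : x == "."
      · simp only [h, if_true, ih]
        simp [rowFill, dRow, h]
        omega
      · simp only [h, Bool.false_eq_true, if_false, ih]
        simp [rowFill, dRow, h]
  suffices hm : ∀ (m : List (List String)) (acc : List (List String)) (p : Nat),
      m.foldl (fun st row =>
        let st2 := row.foldl (fun (st2 : List String × Nat) cell =>
          if cell == "." then (st2.1 ++ [String.ofList [s.getD st2.2 ' ']], st2.2 + 1)
          else (st2.1 ++ [cell], st2.2)) (([] : List String), st.2)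
        (st.1 ++ [st2.1], st2.2)) (acc, p) = (acc ++ matFill s p m, p + dots m) by
    show (matrix.foldl _ (([] : List (List String)), 0)).1 = matFill s 0 matrix
    rw [hm matrix [] 0]
    simp
  intro m
  induction m with
  | nil => intro acc p; simp [matFill, dots]
  | cons r rs ih =>
    intro acc p
    rw [List.foldl_cons]
    show rs.foldl _ ((acc, p).1 ++ [(List.foldl _ ([], (acc, p).2) r).1], (List.foldl _ ([], (acc, p).2) r).2) = _
    rw [hrow r [] p]
    rw [ih]
    simp [matFill, dots]
    omega

theorem rowFill_shift (a s : List Char) : ∀ (row : List String) (p : Nat),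
    rowFill (a ++ s) (a.length + p) row = rowFill s p row := by
  intro row
  induction row with
  | nil => intro p; simp [rowFill]
  | cons x xs ih =>
    intro p
    by_cases h : x == "."
    · simp only [rowFill, h, if_true]
      have hg : (a ++ s).getD (a.length + p) ' ' = s.getD p ' ' := by
        rcases lt_or_ge p s.length with hp | hp
        · rw [List.getD_eq_getElem _ _ (by simp; omega), List.getD_eq_getElem _ _ hp]
          rw [List.getElem_append_right (by omega)]
          congr 1
          omega
        · rw [List.getD_eq_default _ _ (by simp; omega), List.getD_eq_default _ _ hp]
      rw [hg, show a.length + p + 1 = a.length + (p + 1) from by omega, ih]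
    · simp [rowFill, h, ih]

theorem rowFill_front (s t : List Char) : ∀ (row : List String) (p : Nat),
    p + dRow row ≤ s.length → rowFill (s ++ t) p row = rowFill s p row := by
  intro row
  induction row with
  | nil => intro p _; simp [rowFill]
  | cons x xs ih =>
    intro p hle
    by_cases h : x == "."
    · simp only [dRow, h, if_true] at hle ⊢
      simp only [rowFill, h, if_true]
      have hp : p < s.length := by omega
      have hg : (s ++ t).getD p ' ' = s.getD p ' ' := by
        rw [List.getD_eq_getElem _ _ (by simp; omega), List.getD_eq_getElem _ _ hp]
        exact List.getElem_append_left _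
      rw [hg, ih (p + 1) (by omega)]
    · simp only [dRow, h, Bool.false_eq_true, if_false] at hle ⊢
      simp only [rowFill, h, Bool.false_eq_true, if_false]
      rw [ih p (by omega)]

theorem matFill_shift (a s : List Char) : ∀ (m : List (List String)) (p : Nat),
    matFill (a ++ s) (a.length + p) m = matFill s p m := by
  intro m
  induction m with
  | nil => intro p; simp [matFill]
  | cons r rs ih =>
    intro p
    simp only [matFill, rowFill_shift]
    rw [show a.length + p + dRow r = a.length + (p + dRow r) from by omega, ih]

theorem rowFill_nodots (s : List Char) : ∀ (row : List String) (p : Nat),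
    dRow row = 0 → rowFill s p row = row := by
  intro row
  induction row with
  | nil => intro p _; simp [rowFill]
  | cons x xs ih =>
    intro p hd
    by_cases h : x == "."
    · simp [dRow, h] at hd
    · simp only [dRow, h, Bool.false_eq_true, if_false] at hd
      simp only [rowFill, h, Bool.false_eq_true, if_false]
      rw [ih p (by omega)]

theorem matFill_nodots (s : List Char) (m : List (List String)) (p : Nat)
    (h : dots m = 0) : matFill s p m = m := by
  induction m generalizing p with
  | nil => simp [matFill]
  | cons r rs ih =>
    simp only [dots] at h
    simp only [matFill]
    rw [rowFill_nodots s r p (by omega), ih _ (by omega)]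

-- B's per-row options are exactly the rowFills over enumBits
def rowAll (row : List String) : List (List String) :=
  (enumBits (dRow row)).map (fun p => rowFill p 0 row)

theorem rowAll_nil : rowAll [] = [[]] := by
  rfl

theorem rowFill_cons_shift (b : Char) (q : List Char) (xs : List String) :
    rowFill (b :: q) 1 xs = rowFill q 0 xs := by
  have := rowFill_shift [b] q xs 0
  simpa using this

theorem rowAll_cons_nodot (x : String) (xs : List String) (h : (x == ".") = false) :
    rowAll (x :: xs) = (rowAll xs).map (x :: ·) := by
  simp only [rowAll, dRow, h, Bool.false_eq_true, if_false, Nat.zero_add, List.map_map]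
  apply List.map_congr_left
  intro q _
  simp [Function.comp, rowFill, h]

theorem rowAll_cons_dot (xs : List String) :
    rowAll ("." :: xs) = (rowAll xs).map ((("0" : String)) :: ·) ++ (rowAll xs).map ((("1" : String)) :: ·) := by
  simp only [rowAll, dRow]
  rw [if_pos (by rfl), Nat.add_comm 1 (dRow xs), enumBits_succ_front]
  rw [List.map_append, List.map_map, List.map_map, List.map_map, List.map_map]
  congr 1
  · apply List.map_congr_left
    intro q _
    simp only [Function.comp]
    rw [show rowFill ('0' :: q) 0 ("." :: xs)
        = String.ofList [('0' :: q).getD 0 ' '] :: rowFill ('0' :: q) 1 xs from by rw [rowFill]; rfl]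
    rw [rowFill_cons_shift]
    rfl
  · apply List.map_congr_left
    intro q _
    simp only [Function.comp]
    rw [show rowFill ('1' :: q) 0 ("." :: xs)
        = String.ofList [('1' :: q).getD 0 ' '] :: rowFill ('1' :: q) 1 xs from by rw [rowFill]; rfl]
    rw [rowFill_cons_shift]
    rfl

theorem fillRowB_eq (row : List String) : fillRowB row = rowAll row := by
  suffices gen : ∀ (row : List String) (outs : List (List String)),
      row.foldl (fun opts cell =>
        if cell == "." then opts.flatMap (fun r => [r ++ ["0"], r ++ ["1"]])
        else opts.map (fun r => r ++ [cell])) outs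
      = outs.flatMap (fun r => (rowAll row).map (r ++ ·)) by
    show row.foldl _ [[]] = rowAll row
    rw [gen row [[]]]
    simp
  intro row
  induction row with
  | nil => intro outs; rw [rowAll_nil]; simp
  | cons x xs ih =>
    intro outs
    rw [List.foldl_cons]
    by_cases h : x == "."
    · have hx : x = "." := by simpa using h
      subst hx
      rw [if_pos h, ih, rowAll_cons_dot]
      rw [List.flatMap_assoc]
      apply List.flatMap_congr
      intro r _
      simp [List.map_map, Function.comp_def, List.append_assoc]
    · have h' : (x == ".") = false := by simpa using h
      rw [if_neg (by simp [h']), ih, rowAll_cons_nodot x xs h']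
      rw [List.flatMap_map]
      apply List.flatMap_congr
      intro r _
      simp [List.map_map, Function.comp_def, List.append_assoc]

theorem buildB_eq (m : List (List String)) :
    buildB m = (enumBits (dots m)).map (fun s => matFill s 0 m) := by
  induction m with
  | nil => rfl
  | cons r rs ih =>
    rw [show buildB (r :: rs) = (fillRowB r).flatMap (fun h => (buildB rs).map (fun m => h :: m)) from rfl]
    rw [fillRowB_eq, ih, show dots (r :: rs) = dRow r + dots rs from rfl, enumBits_add]
    rw [List.map_flatMap]
    simp only [rowAll, List.flatMap_map]
    apply List.flatMap_congr
    intro p hp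
    have hlen : p.length = dRow r := enumBits_length _ p hp
    simp only [List.map_map]
    apply List.map_congr_left
    intro q _
    simp only [Function.comp]
    rw [show matFill (p ++ q) 0 (r :: rs) = rowFill (p ++ q) 0 r :: matFill (p ++ q) (0 + dRow r) rs from rfl]
    rw [rowFill_front _ _ r 0 (by omega)]
    rw [show (0 + dRow r) = p.length + 0 from by omega, matFill_shift]

theorem A_list_eq (matrix : List (List String)) :
    (List.range (2 ^ dots matrix)).map (fun i =>
        matFill (List.replicate (dots matrix - (PySem.Int.toBinChars (Int.ofNat i)).length) '0'
                   ++ PySem.Int.toBinChars (Int.ofNat i)) 0 matrix)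
      = (enumBits (dots matrix)).map (fun s => matFill s 0 matrix) := by
  rcases Nat.eq_zero_or_pos (dots matrix) with h | h
  · rw [h]
    show (List.range 1).map _ = (enumBits 0).map _
    rw [List.range_one, show enumBits 0 = [[]] from rfl]
    simp only [List.map_cons, List.map_nil]
    rw [matFill_nodots _ _ _ h, matFill_nodots _ _ _ h]
  · rw [← map_padBin_range, List.map_map]
    apply List.map_congr_left
    intro i hi
    simp only [Function.comp]
    rw [toBinChars_eq_binRec, subst_eq_padBin (dots matrix) i h (List.mem_range.mp hi)]

theorem pyCheck_iff (m : List (List String)) : pyCheck m = true ↔ m.Nodup := by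
  constructor
  · intro h
    simp only [pyCheck, List.all_eq_true, List.mem_range, List.mem_range'_1] at h
    apply List.pairwise_iff_getElem.mpr
    intro i j hi hj hij
    have := h i (by omega) j ⟨by omega, by omega⟩
    simp only [Bool.not_eq_eq_eq_not, Bool.not_true, beq_eq_false_iff_ne] at this
    rwa [List.getD_eq_getElem _ _ (by omega), List.getD_eq_getElem _ _ hj] at this
  · intro h
    simp only [pyCheck, List.all_eq_true, List.mem_range, List.mem_range'_1]
    intro i hi j hj
    have hj2 : j < m.length := by omega
    have hij : i < j := by omega
    rw [List.getD_eq_getElem _ _ (by omega), List.getD_eq_getElem _ _ hj2]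
    simp only [Bool.not_eq_eq_eq_not, Bool.not_true, beq_eq_false_iff_ne]
    exact List.pairwise_iff_getElem.mp h i j (by omega) hj2 hij

theorem distinct_iff (m : List (List String)) :
    ((PySem.Set.ofList m).length == m.length) = true ↔ m.Nodup := by
  constructor
  · intro h
    have hlen : (PySem.Set.ofList m).length = m.length := by simpa using h
    have hsub : PySem.Set.ofList m ⊆ m := fun x hx => (PySem.List.mem_dedup m x).mp hx
    have hsp := List.subperm_of_subset (PySem.Set.nodup_ofList m) hsub
    have hperm := List.Subperm.perm_of_length_le hsp (by omega)
    exact (List.Perm.nodup_iff hperm).mp (PySem.Set.nodup_ofList m)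
  · intro h
    rw [PySem.Set.ofList_eq_self_of_nodup m h]
    simp

theorem check_eq_distinct (m : List (List String)) :
    pyCheck m = ((PySem.Set.ofList m).length == m.length) := by
  exact Bool.coe_iff_coe.mp ((pyCheck_iff m).trans (distinct_iff m).symm)

-- ===== VERDICT (by name: the statement is the Claim_ definition above) =====
theorem Generator1_spec : Claim_equal_Generator1 := by
  unfold Claim_equal_Generator1 Spec_Generator1
  intro matrix _
  show Generator1 matrix = Generator1_alt matrix
  simp only [Generator1]
  rw [counter_eq]
  rw [PySem.List.foldl_append_if
    (fun i => pyCheck ((pyFill (List.replicate (dots matrix - (PySem.Int.toBinChars (Int.ofNat i)).length) '0'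
                 ++ PySem.Int.toBinChars (Int.ofNat i)) matrix).1))
    (fun i => (pyFill (List.replicate (dots matrix - (PySem.Int.toBinChars (Int.ofNat i)).length) '0'
                 ++ PySem.Int.toBinChars (Int.ofNat i)) matrix).1)]
  rw [List.nil_append]
  rw [show ((List.range (2 ^ dots matrix)).filter (fun i => pyCheck ((fun i => (pyFill (List.replicate (dots matrix - (PySem.Int.toBinChars (Int.ofNat i)).length) '0'
                 ++ PySem.Int.toBinChars (Int.ofNat i)) matrix).1) i))).map (fun i => (pyFill (List.replicate (dots matrix - (PySem.Int.toBinChars (Int.ofNat i)).length) '0'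
                 ++ PySem.Int.toBinChars (Int.ofNat i)) matrix).1)
      = ((List.range (2 ^ dots matrix)).map (fun i => (pyFill (List.replicate (dots matrix - (PySem.Int.toBinChars (Int.ofNat i)).length) '0'
                 ++ PySem.Int.toBinChars (Int.ofNat i)) matrix).1)).filter pyCheck from by rw [List.filter_map]; rfl]
  simp only [pyFill_eq]
  rw [A_list_eq, ← buildB_eq]
  unfold Generator1_alt
  apply List.filter_congr
  intro cand _
  exact check_eq_distinct cand
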